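-- pv_equiv track=rewrite | github.com/EnzoZafra/Leetcoding | available-captures-for-rook/available-captures-for-rook.py | numRookCaptures
-- ===== SOURCE A (Python) =====
-- def numRookCaptures(board):
--     """
--     :type board: List[List[str]]
--     :rtype: int
--     """
--     rowLen = len(board)
--     colLen = len(board[0])
--     rook = None
--
--     # find the white rook first on the chess board
--     for row in range(rowLen):
--         for col in range(colLen):
--             if board[row][col] == 'R':
--                 rook = (row, col)
--                 break
--
--     # now that we have the rook, do the moves, and count how many times we can kill
--     # that is, just see if theres a black that is not blocked by a white
--
--     directions = [(0,1), (1,0), (-1,0), (0,-1)]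
--     count = 0
--
--     for direction in directions:
--         x = rook[0] + direction[0]
--         y = rook[1] + direction[1]
--         while 0 <= x < rowLen and 0 <= y < colLen:
--             piece = board[x][y]
--
--             if piece == 'p':
--                 count += 1
--                 break
--             elif piece.isupper():
--                 # if a white piece, we cant check this direction anymore
--                 break
--
--             x = x + direction[0]
--             y = y + direction[1]
--
--     return count
-- ===== SOURCE B (Python) =====
-- def numRookCaptures(board):
--     # B: find rook (last row containing 'R', first 'R' in it), then check the
--     # four line segments from the rook; first 'p'-or-uppercase piece decides.
--     r = c = None
--     for i, row in enumerate(board):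
--         if 'R' in row:
--             r, c = i, row.index('R')
--     rowline = board[r]
--     colline = [board[i][c] for i in range(len(board))]
--     segments = [rowline[c + 1:], list(reversed(rowline[:c])),
--                 colline[r + 1:], list(reversed(colline[:r]))]
--     count = 0
--     for seg in segments:
--         first = next((p for p in seg if p == 'p' or p.isupper()), None)
--         if first == 'p':
--             count += 1
--     return count
-- ===== Notes on version B (the rewrite author's own statement) =====
-- stated objective: simpler
-- what changed: B replaces A's four coordinate-stepping while-loops over (x,y) with a decomposition that extracts the rook's row and column as lists and checks the first 'p'-or-uppercase piece of each of the four line segments; the rook is found by a single last-row-wins scan using membership and list.index instead of A's nested index loops.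
-- outside the precondition, e.g. on numRookCaptures([['R'], ['p', 'R']]): A returns 1, B raises IndexError
import Mathlib
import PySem

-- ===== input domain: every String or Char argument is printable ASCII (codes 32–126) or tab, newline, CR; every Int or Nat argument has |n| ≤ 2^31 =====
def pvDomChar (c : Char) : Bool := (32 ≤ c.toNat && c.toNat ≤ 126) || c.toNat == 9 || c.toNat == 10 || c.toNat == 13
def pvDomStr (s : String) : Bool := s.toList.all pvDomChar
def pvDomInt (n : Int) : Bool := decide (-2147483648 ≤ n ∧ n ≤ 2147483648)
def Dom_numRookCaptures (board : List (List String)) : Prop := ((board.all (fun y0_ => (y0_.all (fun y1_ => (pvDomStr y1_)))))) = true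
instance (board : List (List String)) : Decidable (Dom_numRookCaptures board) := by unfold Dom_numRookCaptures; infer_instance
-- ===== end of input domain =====

-- B replaces A's four coordinate-stepping while-loops by extracting the rook's row and
-- column as lists and testing the first 'p'-or-uppercase piece of each of the four
-- segments (objective: simpler decomposition, same cost).

-- Python str.isupper(), hand-ported (PySem has only the Char form); exact on the ASCII
-- domain, where the cased characters are exactly the letters.
def pvIsupperStr (s : String) : Bool :=
  s.toList.any PySem.Chars.isalpha && s.toList.all (fun c => !PySem.Chars.islower c)

-- board[x][y] (both indexes are in range on every access made inside Pre_; the getD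
-- defaults are never used there)
def pvCell (board : List (List String)) (x y : Int) : String :=
  (PySem.List.pyGet? ((PySem.List.pyGet? board x).getD []) y).getD ""

-- ===== PORT A =====
-- inner 'for col in …: if board[row][col] == 'R': rook = (row, col); break'
def pvFindInRow (board : List (List String)) (row : Int) (cols : List Int)
    (rook : Option (Int × Int)) : Option (Int × Int) :=
  match cols with
  | [] => rook
  | col :: rest =>
    if pvCell board row col = "R" then some (row, col)
    else pvFindInRow board row rest rook

-- the 'while 0 <= x < rowLen and 0 <= y < colLen' walk; fuel only makes the recursion
-- structural and is never exhausted while the guard holds (fuel = rowLen+colLen)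
def pvWalk (board : List (List String)) (rowLen colLen dx dy : Int) :
    Nat → Int → Int → Int
  | 0, _, _ => 0
  | fuel + 1, x, y =>
    if 0 ≤ x ∧ x < rowLen ∧ 0 ≤ y ∧ y < colLen then
      let piece := pvCell board x y
      if piece = "p" then 1
      else if pvIsupperStr piece then 0
      else pvWalk board rowLen colLen dx dy fuel (x + dx) (y + dy)
    else 0

def numRookCaptures (board : List (List String)) : Int :=
  let rowLen : Int := board.length
  let colLen : Int := ((PySem.List.pyGet? board 0).getD []).length
  let rook : Option (Int × Int) :=
    (PySem.List.pyRange 0 rowLen 1).foldl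
      (fun rk row => pvFindInRow board row (PySem.List.pyRange 0 colLen 1) rk) none
  -- rook = none ⇔ Python raises TypeError on 'rook[0]'; excluded by Pre_
  let rk := rook.getD (0, 0)
  let directions : List (Int × Int) := [(0, 1), (1, 0), (-1, 0), (0, -1)]
  directions.foldl
    (fun count d =>
      count + pvWalk board rowLen colLen d.1 d.2 (rowLen + colLen).toNat
        (rk.1 + d.1) (rk.2 + d.2)) 0

-- ===== PORT B =====
-- next((p for p in seg if p == 'p' or p.isupper()), None)
def pvFirstHit (seg : List String) : Option String :=
  seg.find? (fun p => p == "p" || pvIsupperStr p)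

def numRookCaptures_alt (board : List (List String)) : Int :=
  let rc : Option (Int × Int) :=
    (PySem.List.enumerate board 0).foldl
      (fun acc p =>
        -- row.index('R') cannot raise under the membership guard, hence the getD 0
        if "R" ∈ p.2 then some (p.1, ((PySem.List.index? p.2 "R").getD 0 : Int))
        else acc) none
  match rc with
  | none => 0   -- Python B raises TypeError here (board[None]); outside Pre_
  | some (r, c) =>
    let rowline := (PySem.List.pyGet? board r).getD []
    let colline := (PySem.List.pyRange 0 (board.length : Int) 1).map
      (fun i => (PySem.List.pyGet? ((PySem.List.pyGet? board i).getD []) c).getD "")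
    let segments := [PySem.List.slice rowline (some (c + 1)) none,
                     (PySem.List.slice rowline none (some c)).reverse,
                     PySem.List.slice colline (some (r + 1)) none,
                     (PySem.List.slice colline none (some r)).reverse]
    segments.foldl
      (fun count seg => count + (if pvFirstHit seg = some "p" then 1 else 0)) 0

-- ===== PRECONDITION & SPEC =====
-- Pre_ excludes the empty board (A raises IndexError on board[0]), boards without an
-- 'R' cell (A raises TypeError on rook[0]), and ragged boards (A raises IndexError or
-- silently scans only the first len(board[0]) entries of longer rows, which B does not
-- reproduce).
def Pre_numRookCaptures (board : List (List String)) : Prop :=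
  board ≠ [] ∧ (∀ row ∈ board, row.length = (board.headD []).length) ∧
    (∃ row ∈ board, "R" ∈ row)
instance (board : List (List String)) : Decidable (Pre_numRookCaptures board) := by
  unfold Pre_numRookCaptures; infer_instance

def pvWitness_numRookCaptures : List (List String) :=
  [[".", "R"], ["p", "."]]

def Spec_numRookCaptures (board : List (List String)) (out : Int) : Prop := out = numRookCaptures_alt board
instance (board : List (List String)) (out : Int) : Decidable (Spec_numRookCaptures board out) := by unfold Spec_numRookCaptures; infer_instance

-- ===== CLAIM (what is proved, stated in full; the proofs are below) =====
def Claim_equal_numRookCaptures : Prop := ∀ (board : List (List String)), Dom_numRookCaptures board → Pre_numRookCaptures board → Spec_numRookCaptures board (numRookCaptures board)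

-- ===== LEMMAS AND PROOFS =====


-- the contribution of one line segment: 1 iff the first 'p'-or-uppercase piece is 'p'
def pvSegCount : List String → Int
  | [] => 0
  | p :: t => if p = "p" then 1 else if pvIsupperStr p then 0 else pvSegCount t

theorem pvSegCount_eq_firstHit (l : List String) :
    (if pvFirstHit l = some "p" then (1 : Int) else 0) = pvSegCount l := by
  induction l with
  | nil => simp [pvFirstHit, pvSegCount]
  | cons p t ih =>
    by_cases hp : p = "p"
    · simp [pvFirstHit, pvSegCount, hp]
    · by_cases hu : pvIsupperStr p = true
      · simp [pvFirstHit, pvSegCount, hp, hu]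
      · simpa [pvFirstHit, pvSegCount, hp, hu] using ih

theorem pvFindInRow_eq (board : List (List String)) (i : Int) (rk : Option (Int × Int))
    (r : List String) (hr : (PySem.List.pyGet? board i).getD [] = r) :
    ∀ (a : Nat), a ≤ r.length →
    pvFindInRow board i (PySem.List.pyRange (a : Int) (r.length : Int) 1) rk =
      (match PySem.List.index? (r.drop a) "R" with
       | some j => some (i, ((a + j : Nat) : Int))
       | none => rk) := by
  intro a ha
  induction hd : r.length - a generalizing a with
  | zero =>
    have haz : a = r.length := by omega
    subst haz
    rw [PySem.List.pyRange_one_eq_nil (by omega)]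
    simp [pvFindInRow, List.drop_length]
  | succ d ih =>
    have haa : a < r.length := by omega
    rw [PySem.List.pyRange_one_cons (by exact_mod_cast haa)]
    have hcell : pvCell board i (a : Int) = r[a] := by
      simp [pvCell, hr, haa]
    have hdrop : r.drop a = r[a] :: r.drop (a + 1) :=
      List.drop_eq_getElem_cons haa
    by_cases hcR : r[a] = "R"
    · rw [pvFindInRow, if_pos (by rw [hcell]; exact hcR), hdrop, hcR,
        PySem.List.index?_cons_self]
      simp
    · have hstep : ((a : Int) + 1) = ((a + 1 : Nat) : Int) := by push_cast; ring
      rw [pvFindInRow, if_neg (by rw [hcell]; exact hcR), hstep,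
        ih (a + 1) (by omega) (by omega)]

      rw [hdrop, PySem.List.index?_cons_of_ne (List.drop (a + 1) r) hcR]
      cases hidx : PySem.List.index? (r.drop (a + 1)) "R" with
      | none => simp
      | some j =>
        simp only [Option.map_some]
        norm_num
        omega

-- both rook scans are the same fold over the index range
theorem pvRook_eq (board : List (List String)) (m : Nat)
    (hrect : ∀ row ∈ board, row.length = m) :
    (PySem.List.pyRange 0 (board.length : Int) 1).foldl
      (fun rk row => pvFindInRow board row (PySem.List.pyRange 0 (m : Int) 1) rk) none =
    (PySem.List.enumerate board 0).foldl
      (fun acc p =>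
        if "R" ∈ p.2 then some (p.1, ((PySem.List.index? p.2 "R").getD 0 : Int))
        else acc) none := by
  rw [PySem.List.enumerate_eq_map_pyRange board [], List.foldl_map]
  simp only [PySem.List.len_eq]
  apply PySem.List.foldl_congr_mem
  intro acc i hi
  rw [PySem.List.mem_pyRange_one] at hi
  obtain ⟨k, rfl⟩ : ∃ k : Nat, i = (k : Int) := ⟨i.toNat, by omega⟩
  have hk : k < board.length := by exact_mod_cast hi.2
  have hget : PySem.List.pyGetD board (k : Int) [] = board[k] := by
    simp [PySem.List.pyGetD, hk]
  have hr : (PySem.List.pyGet? board (k : Int)).getD [] = board[k] := by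
    simp [hk]
  have hlen : (board[k] : List String).length = m := hrect _ (by simp)
  have h0 : (0 : Int) = ((0 : Nat) : Int) := rfl
  rw [h0, ← hlen, pvFindInRow_eq board (k : Int) acc board[k] hr 0 (by omega), hget]
  cases hidx : PySem.List.index? (board[k] : List String) "R" with
  | none =>
    have : "R" ∉ (board[k] : List String) := by
      rw [← PySem.List.index?_eq_none_iff]; exact hidx
    have hidx' := hidx
    rw [PySem.List.index?_eq_idxOf?] at hidx'
    simp [this, hidx']
  | some j =>
    have : "R" ∈ (board[k] : List String) := by
      rw [← PySem.List.index?_isSome_iff, hidx]; rfl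
    have hidx' := hidx
    rw [PySem.List.index?_eq_idxOf?] at hidx'
    simp [this, hidx']

-- the rook scan yields in-range coordinates when some row contains "R"
theorem pvRook_some (board : List (List String)) (m : Nat)
    (hrect : ∀ row ∈ board, row.length = m)
    (hR : ∃ row ∈ board, "R" ∈ row) :
    ∃ (k j : Nat), k < board.length ∧ j < m ∧
      (PySem.List.enumerate board 0).foldl
        (fun acc p =>
          if "R" ∈ p.2 then some (p.1, ((PySem.List.index? p.2 "R").getD 0 : Int))
          else acc) none = some ((k : Int), (j : Int)) := by
  have aux : ∀ (bd : List (List String)) (s : Int) (acc : Option (Int × Int)),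
      ((PySem.List.enumerate bd s).foldl
          (fun acc p =>
            if "R" ∈ p.2 then some (p.1, ((PySem.List.index? p.2 "R").getD 0 : Int))
            else acc) acc = acc ∧ ∀ row ∈ bd, "R" ∉ row)
      ∨ (∃ (k j : Nat), k < bd.length ∧
          (PySem.List.enumerate bd s).foldl
            (fun acc p =>
              if "R" ∈ p.2 then some (p.1, ((PySem.List.index? p.2 "R").getD 0 : Int))
              else acc) acc = some (s + (k : Int), (j : Int)) ∧
          ∃ hk : k < bd.length, PySem.List.index? bd[k] "R" = some j) := by
    intro bd
    induction bd with
    | nil => intro s acc; left; simp [PySem.List.enumerate_nil]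
    | cons row tl ih =>
      intro s acc
      rw [PySem.List.enumerate_cons, List.foldl_cons]
      rcases ih (s + 1)
          (if "R" ∈ row then some (s, ((PySem.List.index? row "R").getD 0 : Int)) else acc) with
        ⟨heq, hnone⟩ | ⟨k, j, hk, heq, hk', hidx⟩
      · by_cases hmem : "R" ∈ row
        · right
          obtain ⟨j, hj⟩ : ∃ j, PySem.List.index? row "R" = some j := by
            have := (PySem.List.index?_isSome_iff (xs := row) (v := "R")).mpr hmem
            exact Option.isSome_iff_exists.mp this
          refine ⟨0, j, by simp, ?_, by simp, by simpa using hj⟩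
          rw [heq]
          have hj' := hj
          rw [PySem.List.index?_eq_idxOf?] at hj'
          simp [hmem, hj']
        · left
          constructor
          · rw [heq]; simp [hmem]
          · intro r hrm
            rcases List.mem_cons.mp hrm with rfl | hrm'
            · exact hmem
            · exact hnone _ hrm'  
      · right
        refine ⟨k + 1, j, by simpa using hk, ?_, by simpa using hk', by simpa using hidx⟩
        rw [heq]
        congr 1
        push_cast
        ring_nf
  rcases aux board 0 none with ⟨_, hnone⟩ | ⟨k, j, hk, heq, hk', hidx⟩
  · obtain ⟨r0, hr0, hR0⟩ := hR
    exact absurd hR0 (hnone r0 hr0)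
  · refine ⟨k, j, hk, ?_, ?_⟩
    · obtain ⟨hjlt, -, -⟩ := PySem.List.getElem_of_index?_eq_some hidx
      rw [← hrect board[k] (by simp)]
      exact hjlt
    · rw [heq]; congr 1; simp

-- walking right along the rook's row
theorem pvWalk_right (board : List (List String)) (m k : Nat) (hk : k < board.length)
    (row : List String) (hrow : (PySem.List.pyGet? board (k : Int)).getD [] = row)
    (hm : row.length = m) :
    ∀ (fuel y : Nat), y ≤ m → m - y ≤ fuel →
    pvWalk board (board.length : Int) (m : Int) 0 1 fuel (k : Int) (y : Int) =
      pvSegCount (row.drop y) := by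
  intro fuel
  induction fuel with
  | zero =>
    intro y hy hf
    have hym : y = m := by omega
    subst hym
    simp [pvWalk, ← hm, List.drop_length, pvSegCount]
  | succ f ihf =>
    intro y hy hf
    by_cases hym : y < m
    · have hguard : (0 : Int) ≤ (k : Int) ∧ (k : Int) < (board.length : Int) ∧
          (0 : Int) ≤ (y : Int) ∧ (y : Int) < (m : Int) := by
        refine ⟨by positivity, by exact_mod_cast hk, by positivity, by exact_mod_cast hym⟩
      have hylen : y < row.length := by omega
      have hrowk : board[k] = row := by simpa [hk] using hrow
      have hpiece : pvCell board (k : Int) (y : Int) = row[y] := by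
        simp [pvCell, hk, hrowk, hylen]
      have hdrop : row.drop y = row[y] :: row.drop (y + 1) :=
        List.drop_eq_getElem_cons hylen
      rw [pvWalk, if_pos hguard, hdrop, pvSegCount, hpiece]
      by_cases hp : row[y] = "p"
      · simp [hp]
      · by_cases hu : pvIsupperStr row[y] = true
        · simp [hp, hu]
        · rw [if_neg hp, if_neg hp, if_neg (by simpa using hu), if_neg (by simpa using hu)]
          have hcast : ((y : Int) + 1) = ((y + 1 : Nat) : Int) := by push_cast; ring
          rw [add_zero, hcast]
          exact ihf (y + 1) (by omega) (by omega)
    · have hym' : y = m := by omega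
      subst hym'
      rw [pvWalk, if_neg (by omega)]
      simp [← hm, List.drop_length, pvSegCount]

-- walking left along the rook's row (position y-1, so y = 0 starts out of range)
theorem pvWalk_left (board : List (List String)) (m k : Nat) (hk : k < board.length)
    (row : List String) (hrow : (PySem.List.pyGet? board (k : Int)).getD [] = row)
    (hm : row.length = m) :
    ∀ (fuel y : Nat), y ≤ m → y ≤ fuel →
    pvWalk board (board.length : Int) (m : Int) 0 (-1) fuel (k : Int) ((y : Int) - 1) =
      pvSegCount ((row.take y).reverse) := by
  intro fuel
  induction fuel with
  | zero =>
    intro y hy hf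
    have hy0 : y = 0 := by omega
    subst hy0
    simp [pvWalk, pvSegCount]
  | succ f ihf =>
    intro y hy hf
    match y with
    | 0 =>
      rw [pvWalk, if_neg (by omega)]
      simp [pvSegCount]
    | y' + 1 =>
      have hpos : ((y' + 1 : Nat) : Int) - 1 = (y' : Int) := by push_cast; ring
      rw [hpos]
      have hylen : y' < row.length := by omega
      have hguard : (0 : Int) ≤ (k : Int) ∧ (k : Int) < (board.length : Int) ∧
          (0 : Int) ≤ (y' : Int) ∧ (y' : Int) < (m : Int) := by
        refine ⟨by positivity, by exact_mod_cast hk, by positivity, by exact_mod_cast (by omega : y' < m)⟩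
      have hrowk : board[k] = row := by simpa [hk] using hrow
      have hpiece : pvCell board (k : Int) (y' : Int) = row[y'] := by
        simp [pvCell, hk, hrowk, hylen]
      have htake : (row.take (y' + 1)).reverse = row[y'] :: (row.take y').reverse := by
        rw [List.take_add_one, List.getElem?_eq_getElem hylen]
        simp
      rw [pvWalk, if_pos hguard, htake, pvSegCount, hpiece]
      by_cases hp : row[y'] = "p"
      · simp [hp]
      · by_cases hu : pvIsupperStr row[y'] = true
        · simp [hp, hu]
        · rw [if_neg hp, if_neg hp, if_neg (by simpa using hu), if_neg (by simpa using hu)]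
          rw [add_zero]
          exact ihf y' (by omega) (by omega)

-- walking down the rook's column
theorem pvWalk_down (board : List (List String)) (m j : Nat) (hj : j < m)
    (col : List String)
    (hcol : (PySem.List.pyRange 0 (board.length : Int) 1).map
      (fun i => (PySem.List.pyGet? ((PySem.List.pyGet? board i).getD []) (j : Int)).getD "") = col) :
    ∀ (fuel x : Nat), x ≤ board.length → board.length - x ≤ fuel →
    pvWalk board (board.length : Int) (m : Int) 1 0 fuel (x : Int) (j : Int) =
      pvSegCount (col.drop x) := by
  have hlen : col.length = board.length := by
    rw [← hcol]; simp [PySem.List.length_pyRange_one]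
  have hcell : ∀ x : Nat, x < board.length → pvCell board (x : Int) (j : Int) = (col[x]?).getD "" := by
    intro x hx
    have h := PySem.List.getElem?_map_pyRange_zero
      (fun i => (PySem.List.pyGet? ((PySem.List.pyGet? board i).getD []) (j : Int)).getD "")
      board.length x hx
    rw [hcol] at h
    simp only [h, Option.getD_some, pvCell]
  intro fuel
  induction fuel with
  | zero =>
    intro x hx hf
    have hxn : x = board.length := by omega
    subst hxn
    simp [pvWalk, ← hlen, List.drop_length, pvSegCount]
  | succ f ihf =>
    intro x hx hf
    by_cases hxn : x < board.length
    · have hguard : (0 : Int) ≤ (x : Int) ∧ (x : Int) < (board.length : Int) ∧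
          (0 : Int) ≤ (j : Int) ∧ (j : Int) < (m : Int) := by
        refine ⟨by positivity, by exact_mod_cast hxn, by positivity, by exact_mod_cast hj⟩
      have hxlen : x < col.length := by omega
      have hdrop : col.drop x = col[x] :: col.drop (x + 1) :=
        List.drop_eq_getElem_cons hxlen
      have hpiece : pvCell board (x : Int) (j : Int) = col[x] := by
        rw [hcell x hxn]
        simp [List.getElem?_eq_getElem hxlen]
      rw [pvWalk, if_pos hguard, hdrop, pvSegCount, hpiece]
      by_cases hp : col[x] = "p"
      · simp [hp]
      · by_cases hu : pvIsupperStr col[x] = true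
        · simp [hp, hu]
        · rw [if_neg hp, if_neg hp, if_neg (by simpa using hu), if_neg (by simpa using hu)]
          have hcast : ((x : Int) + 1) = ((x + 1 : Nat) : Int) := by push_cast; ring
          rw [add_zero, hcast]
          exact ihf (x + 1) (by omega) (by omega)
    · have hxn' : x = board.length := by omega
      subst hxn'
      rw [pvWalk, if_neg (by omega)]
      simp [← hlen, List.drop_length, pvSegCount]

-- walking up the rook's column
theorem pvWalk_up (board : List (List String)) (m j : Nat) (hj : j < m)
    (col : List String)
    (hcol : (PySem.List.pyRange 0 (board.length : Int) 1).map
      (fun i => (PySem.List.pyGet? ((PySem.List.pyGet? board i).getD []) (j : Int)).getD "") = col) :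
    ∀ (fuel x : Nat), x ≤ board.length → x ≤ fuel →
    pvWalk board (board.length : Int) (m : Int) (-1) 0 fuel ((x : Int) - 1) (j : Int) =
      pvSegCount ((col.take x).reverse) := by
  have hlen : col.length = board.length := by
    rw [← hcol]; simp [PySem.List.length_pyRange_one]
  have hcell : ∀ x : Nat, x < board.length → pvCell board (x : Int) (j : Int) = (col[x]?).getD "" := by
    intro x hx
    have h := PySem.List.getElem?_map_pyRange_zero
      (fun i => (PySem.List.pyGet? ((PySem.List.pyGet? board i).getD []) (j : Int)).getD "")
      board.length x hx
    rw [hcol] at h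
    simp only [h, Option.getD_some, pvCell]
  intro fuel
  induction fuel with
  | zero =>
    intro x hx hf
    have hx0 : x = 0 := by omega
    subst hx0
    simp [pvWalk, pvSegCount]
  | succ f ihf =>
    intro x hx hf
    match x with
    | 0 =>
      rw [pvWalk, if_neg (by omega)]
      simp [pvSegCount]
    | x' + 1 =>
      have hpos : ((x' + 1 : Nat) : Int) - 1 = (x' : Int) := by push_cast; ring
      rw [hpos]
      have hxn : x' < board.length := by omega
      have hxlen : x' < col.length := by omega
      have hguard : (0 : Int) ≤ (x' : Int) ∧ (x' : Int) < (board.length : Int) ∧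
          (0 : Int) ≤ (j : Int) ∧ (j : Int) < (m : Int) := by
        refine ⟨by positivity, by exact_mod_cast hxn, by positivity, by exact_mod_cast hj⟩
      have hpiece : pvCell board (x' : Int) (j : Int) = col[x'] := by
        rw [hcell x' hxn]
        simp [List.getElem?_eq_getElem hxlen]
      have htake : (col.take (x' + 1)).reverse = col[x'] :: (col.take x').reverse := by
        rw [List.take_add_one, List.getElem?_eq_getElem hxlen]
        simp
      rw [pvWalk, if_pos hguard, htake, pvSegCount, hpiece]
      by_cases hp : col[x'] = "p"
      · simp [hp]
      · by_cases hu : pvIsupperStr col[x'] = true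
        · simp [hp, hu]
        · rw [if_neg hp, if_neg hp, if_neg (by simpa using hu), if_neg (by simpa using hu)]
          rw [add_zero]
          exact ihf x' (by omega) (by omega)


-- ===== VERDICT (by name: the statement is the Claim_ definition above) =====
theorem numRookCaptures_spec : Claim_equal_numRookCaptures := by
  intro board _ hpre
  obtain ⟨hne, hrect, hR⟩ := hpre
  unfold Spec_numRookCaptures
  obtain ⟨k, j, hk, hj, hres⟩ :=
    pvRook_some board (board.headD []).length hrect hR
  have hrowline : (PySem.List.pyGet? board (k : Int)).getD [] = board[k] := by
    simp [hk]
  have hmrow : (board[k] : List String).length = (board.headD []).length :=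
    hrect _ (by simp)
  have hcolInt :
      ((((PySem.List.pyGet? board (0 : Int)).getD [] : List String).length : Int)) =
        (((board.headD []).length : Nat) : Int) := by
    cases board with
    | nil => exact absurd rfl hne
    | cons h t =>
      have h0 : PySem.List.pyGet? (h :: t) ((0 : Nat) : Int) = (h :: t)[0]? :=
        PySem.List.pyGet?_natCast (h :: t) 0
      simp at h0
      simp
  have hF : (((board.length : Nat) : Int) + (((board.headD []).length : Nat) : Int)).toNat =
      board.length + (board.headD []).length := by omega
  unfold numRookCaptures numRookCaptures_alt
  simp only [hcolInt]
  rw [pvRook_eq board (board.headD []).length hrect, hres]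
  simp only [Option.getD_some, List.foldl_cons, List.foldl_nil, hF, add_zero]
  rw [show ((j : Int) + 1) = (((j + 1 : Nat) : Nat) : Int) from by push_cast; ring,
    show ((k : Int) + 1) = (((k + 1 : Nat) : Nat) : Int) from by push_cast; ring,
    show ((k : Int) + -1) = ((k : Int) - 1) from by ring,
    show ((j : Int) + -1) = ((j : Int) - 1) from by ring]
  rw [pvWalk_right board (board.headD []).length k hk board[k] hrowline hmrow
      (board.length + (board.headD []).length) (j + 1) (by omega) (by omega)]
  rw [pvWalk_left board (board.headD []).length k hk board[k] hrowline hmrow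
      (board.length + (board.headD []).length) j (by omega) (by omega)]
  rw [pvWalk_down board (board.headD []).length j hj _ rfl
      (board.length + (board.headD []).length) (k + 1) (by omega) (by omega)]
  rw [pvWalk_up board (board.headD []).length j hj _ rfl
      (board.length + (board.headD []).length) k (by omega) (by omega)]
  rw [hrowline]
  rw [PySem.List.slice_from_natCast, PySem.List.slice_to_natCast,
    PySem.List.slice_from_natCast, PySem.List.slice_to_natCast]
  rw [pvSegCount_eq_firstHit, pvSegCount_eq_firstHit, pvSegCount_eq_firstHit,
    pvSegCount_eq_firstHit]
  ring
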